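-- pv_equiv track=rewrite | github.com/weifo/interview_preps | algorithms/delete_copy_chars.py | func
-- ===== SOURCE A (Python) =====
-- def func(s):
--     charlist=list(s)
--     n,numb=0,0
--     for i in range(len(charlist)):
--         if charlist[i] !='a':
--             charlist[n]=charlist[i]
--             n+=1
--         if charlist[i]=='b':
--             numb+=1
--     charlist=charlist[0:n]
--     j,k=len(charlist)+numb-1,len(charlist)-1
--     result=[None]*(j+1)
--
--     while(k>=0):
--         result[j]=charlist[k]
--         j-=1
--         if charlist[k]=='b':
--             result[j]='b'
--             j-=1
--         k-=1
--
--     return ''.join(result)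
-- ===== SOURCE B (Python) =====
-- def func(s):
--     # one forward pass: drop 'a', emit 'bb' for 'b', keep everything else
--     return ''.join('' if c == 'a' else 'bb' if c == 'b' else c for c in s)
-- ===== Notes on version B (the rewrite author's own statement) =====
-- stated objective: simpler
-- what changed: A compacts the list in place (removing 'a's while counting 'b's) and then fills a pre-sized output array backwards; B is a single forward pass mapping each char to its replacement piece and joining.
import Mathlib
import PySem

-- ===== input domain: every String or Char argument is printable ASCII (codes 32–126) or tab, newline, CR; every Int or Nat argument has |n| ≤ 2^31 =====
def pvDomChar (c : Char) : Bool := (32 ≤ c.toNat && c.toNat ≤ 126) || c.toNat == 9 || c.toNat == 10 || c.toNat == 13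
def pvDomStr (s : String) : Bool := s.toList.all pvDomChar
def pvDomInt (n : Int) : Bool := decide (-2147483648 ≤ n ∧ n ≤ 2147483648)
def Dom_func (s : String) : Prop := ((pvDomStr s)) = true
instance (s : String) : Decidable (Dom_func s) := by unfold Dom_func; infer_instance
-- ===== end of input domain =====

-- B removes 'a' and doubles 'b' in ONE forward pass; A does an in-place compaction
-- pass plus a backward fill of a pre-sized array. Same return value on every input.

-- ===== PORT A =====
-- body of the first for-loop: compact non-'a' chars to position n, count 'b's
def funcStep1 (st : List Char × Nat × Nat) (i : Nat) : List Char × Nat × Nat :=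
  let c := st.1.getD i ' '          -- charlist[i]; i < len, so the default is never read
  ((if c ≠ 'a' then st.1.set st.2.1 c else st.1),
   (if c ≠ 'a' then st.2.1 + 1 else st.2.1),
   (if c = 'b' then st.2.2 + 1 else st.2.2))

-- the while-loop: fill `result` backwards; fuel = number of iterations (k runs len-1 … 0)
def funcFill (cl2 : List Char) : Nat → List (Option Char) → Int → Int → List (Option Char)
  | 0, res, _, _ => res
  | fuel + 1, res, j, k =>
    if k ≥ 0 then
      let c := cl2.getD k.toNat ' '      -- charlist[k]; in range whenever the loop runs
      let res1 := res.set j.toNat (some c)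
      let j1 := j - 1
      let res2 := if c = 'b' then res1.set j1.toNat (some 'b') else res1
      let j2 := if c = 'b' then j1 - 1 else j1
      funcFill cl2 fuel res2 j2 (k - 1)
    else res

def func (s : String) : String :=
  let charlist := s.toList
  let st := (List.range charlist.length).foldl funcStep1 (charlist, 0, 0)
  let cl2 := st.1.take st.2.1          -- charlist[0:n] (n ≤ len always holds)
  let numb := st.2.2
  let j : Int := (cl2.length : Int) + (numb : Int) - 1
  let k : Int := (cl2.length : Int) - 1
  let result := List.replicate (j + 1).toNat (none : Option Char)
  -- the while loop runs exactly cl2.length times (k goes len-1 … 0)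
  let result := funcFill cl2 cl2.length result j k
  String.mk (result.filterMap id)      -- ''.join(result); every slot holds a char here

-- ===== PORT B =====
-- the per-character replacement piece of Source B's generator expression
def funcPiece (c : Char) : List Char :=
  if c = 'a' then [] else if c = 'b' then ['b', 'b'] else [c]

def func_alt (s : String) : String :=
  String.mk (s.toList.flatMap funcPiece)

-- ===== PRECONDITION & SPEC =====
def Spec_func (s : String) (out : String) : Prop := out = func_alt s
instance (s : String) (out : String) : Decidable (Spec_func s out) := by unfold Spec_func; infer_instance

-- ===== CLAIM (what is proved, stated in full; the proofs are below) =====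
def Claim_equal_func : Prop := ∀ (s : String), Dom_func s → Spec_func s (func s)

-- ===== LEMMAS AND PROOFS =====

-- what phase 2 of A appends per char of the compacted (a-free) list
def funcDouble (c : Char) : List Char :=
  if c = 'b' then ['b', 'b'] else [c]

-- writing just past an all-`x` prefix
lemma set_after_replicate {α : Type} (M : Nat) (x y : α) (tail : List α) :
    (List.replicate (M + 1) x ++ tail).set M y = List.replicate M x ++ y :: tail := by
  rw [show List.replicate (M + 1) x = List.replicate M x ++ [x] by
        simp [List.replicate_succ'],
      List.append_assoc, List.set_append_right _ _ (by simp)]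
  simp

-- invariant of A's first loop: after m steps the first n slots hold the a-free
-- prefix, the suffix from m on is untouched, and numb counts the 'b's seen
lemma func_pass1 (l : List Char) : ∀ m, m ≤ l.length →
    ∃ cl : List Char,
      (List.range m).foldl funcStep1 (l, 0, 0) =
        (cl, ((l.take m).filter (fun c => c != 'a')).length,
             ((l.take m).filter (fun c => c == 'b')).length)
      ∧ cl.length = l.length
      ∧ cl.take ((l.take m).filter (fun c => c != 'a')).length
          = (l.take m).filter (fun c => c != 'a')
      ∧ cl.drop m = l.drop m := by
  intro m
  induction m with
  | zero => intro _; exact ⟨l, by simp⟩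
  | succ m ih =>
    intro hm1
    have hm : m < l.length := by omega
    obtain ⟨cl, hfold, hlen, htake, hdrop⟩ := ih (by omega)
    set F := (l.take m).filter (fun c => c != 'a') with hF
    have hnm : F.length ≤ m := by
      calc F.length ≤ (l.take m).length := List.length_filter_le _ _
        _ ≤ m := by simp
    have hnlt : F.length < cl.length := by omega
    have hget : cl.getD m ' ' = l[m] := by
      rw [List.getD_eq_getElem _ _ (by omega)]
      have h0 : (cl.drop m)[0]'(by simp; omega) = (l.drop m)[0]'(by simp; omega) := by
        simp [hdrop]
      simpa [List.getElem_drop] using h0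
    have htakem1 : l.take (m + 1) = l.take m ++ [l[m]] := by
      rw [List.take_add_one]; simp [List.getElem?_eq_getElem hm]
    rw [List.range_succ, List.foldl_append]
    simp only [List.foldl_cons, List.foldl_nil, hfold]
    simp only [funcStep1, hget]
    by_cases ha : l[m] = 'a'
    · -- 'a' is dropped: state unchanged, both filters unchanged
      have hfa : (l.take (m + 1)).filter (fun c => c != 'a') = F := by
        rw [htakem1, List.filter_append, ← hF]; simp [ha]
      have hfb : (l.take (m + 1)).filter (fun c => c == 'b')
          = (l.take m).filter (fun c => c == 'b') := by
        rw [htakem1, List.filter_append]; simp [ha]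
      refine ⟨cl, ?_, hlen, ?_, ?_⟩
      · simp [ha, hfa, hfb]
      · rw [hfa]; exact htake
      · have hd1 : List.drop (m + 1) cl = List.drop 1 (List.drop m cl) := by
          rw [List.drop_drop, Nat.add_comm]
        have hd2 : List.drop (m + 1) l = List.drop 1 (List.drop m l) := by
          rw [List.drop_drop, Nat.add_comm]
        rw [hd1, hd2, hdrop]
    · -- non-'a' is written at position F.length
      have hfa : (l.take (m + 1)).filter (fun c => c != 'a') = F ++ [l[m]] := by
        rw [htakem1, List.filter_append, ← hF]; simp [ha]
      have hfb : (l.take (m + 1)).filter (fun c => c == 'b')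
          = (l.take m).filter (fun c => c == 'b')
            ++ (if l[m] = 'b' then [l[m]] else []) := by
        rw [htakem1, List.filter_append]
        congr 1
        by_cases hb : l[m] = 'b' <;> simp [hb]
      refine ⟨cl.set F.length l[m], ?_, by simp [hlen], ?_, ?_⟩
      · by_cases hb : l[m] = 'b' <;> simp [ha, hb, hfa, hfb]
      · rw [hfa]
        have hsplit : cl.take (F.length + 1) = F ++ [cl[F.length]'hnlt] := by
          rw [List.take_add_one, List.getElem?_eq_getElem hnlt]
          simp [htake]
        have hlen2 : (F ++ [l[m]]).length = F.length + 1 := by simp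
        rw [hlen2, List.take_set, hsplit, List.set_append_right _ _ (by simp)]
        simp
      · have hd1 : List.drop (m + 1) cl = List.drop 1 (List.drop m cl) := by
          rw [List.drop_drop, Nat.add_comm]
        have hd2 : List.drop (m + 1) l = List.drop 1 (List.drop m l) := by
          rw [List.drop_drop, Nat.add_comm]
        rw [List.drop_set_of_lt (by omega), hd1, hd2, hdrop]

-- length bookkeeping: doubling each 'b' adds one slot per 'b'
lemma func_len_flatMap (L : List Char) :
    (L.flatMap funcDouble).length = L.length + (L.filter (fun c => c == 'b')).length := by
  induction L with
  | nil => simp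
  | cons c t ih =>
    by_cases hb : c = 'b' <;>
      simp [funcDouble, hb, ih] <;> omega

-- removing 'a's does not change the 'b' count
lemma func_filter_b (l : List Char) :
    ((l.filter (fun c => c != 'a')).filter (fun c => c == 'b'))
      = l.filter (fun c => c == 'b') := by
  rw [List.filter_filter]
  apply List.filter_congr
  intro c _
  by_cases hb : c = 'b' <;> simp [hb]

-- the backward fill writes exactly the doubled list (proved back-to-front)
lemma func_fill (cl2 : List Char) (pre : List Char) :
    ∀ tail : List (Option Char), cl2.take pre.length = pre →
    funcFill cl2 pre.length
        (List.replicate (pre.flatMap funcDouble).length (none : Option Char) ++ tail)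
        (((pre.flatMap funcDouble).length : Int) - 1) ((pre.length : Int) - 1)
      = (pre.flatMap funcDouble).map some ++ tail := by
  induction pre using List.reverseRecOn with
  | nil => intro tail _; simp [funcFill]
  | append_singleton ps c ih =>
    intro tail h
    have h' : cl2.take (ps.length + 1) = ps ++ [c] := by simpa using h
    have hlen : ps.length + 1 ≤ cl2.length := by
      have := congrArg List.length h'
      simp at this; omega
    have hps : cl2.take ps.length = ps := by
      have heq : cl2.take ps.length = (cl2.take (ps.length + 1)).take ps.length := by
        rw [List.take_take]; congr 1; omega
      rw [heq, h']
      simp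
    have hgetc : cl2.getD ps.length ' ' = c := by
      rw [List.getD_eq_getElem _ _ (by omega)]
      have heq : (cl2.take (ps.length + 1))[ps.length]'(by simp; omega)
          = cl2[ps.length]'(by omega) := List.getElem_take
      rw [← heq]
      simp [h']
    have hflat : (ps ++ [c]).flatMap funcDouble = ps.flatMap funcDouble ++ funcDouble c := by
      simp
    set M := (ps.flatMap funcDouble).length with hM
    rw [show (ps ++ [c]).length = ps.length + 1 by simp]
    rw [funcFill]
    simp only [show ((ps.length + 1 : Nat) : Int) - 1 ≥ 0 by omega, if_true]
    simp only [show (((ps.length + 1 : Nat) : Int) - 1).toNat = ps.length by omega, hgetc]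
    by_cases hb : c = 'b'
    · subst hb
      have hpiece : (funcDouble 'b').length = 2 := by simp [funcDouble]
      have hlenflat : ((ps ++ ['b']).flatMap funcDouble).length = M + 2 := by
        rw [hflat, List.length_append, hpiece, hM]
      rw [hlenflat]
      simp only [if_true]
      rw [show (((M + 2 : Nat) : Int) - 1).toNat = M + 1 by omega]
      rw [show (M + 2 : Nat) = (M + 1) + 1 by omega, set_after_replicate]
      rw [show ((((M + 2 : Nat) : Int) - 1) - 1).toNat = M by omega]
      rw [show List.replicate (M + 1) (none : Option Char) ++ some 'b' :: tail
            = List.replicate (M + 1) none ++ (some 'b' :: tail) by rfl,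
        set_after_replicate]
      rw [show ((((ps.length + 1 : Nat) : Int) - 1) - 1) = ((ps.length : Nat) : Int) - 1 by omega]
      rw [show (((M + 2 : Nat) : Int) - 1) - 1 - 1 = ((M : Nat) : Int) - 1 by omega]
      rw [ih (some 'b' :: some 'b' :: tail) hps, hflat]
      simp [funcDouble]
    · have hpiece : (funcDouble c).length = 1 := by simp [funcDouble, hb]
      have hlenflat : ((ps ++ [c]).flatMap funcDouble).length = M + 1 := by
        rw [hflat, List.length_append, hpiece, hM]
      rw [hlenflat]
      simp only [hb, if_false]
      rw [show (((M + 1 : Nat) : Int) - 1).toNat = M by omega, set_after_replicate]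
      rw [show ((((ps.length + 1 : Nat) : Int) - 1) - 1) = ((ps.length : Nat) : Int) - 1 by omega]
      rw [show (((M + 1 : Nat) : Int) - 1) - 1 = ((M : Nat) : Int) - 1 by omega]
      rw [ih (some c :: tail) hps, hflat]
      simp [funcDouble, hb]

-- filtering the 'a's first and then doubling is B's single pass
lemma func_flat (l : List Char) :
    (l.filter (fun c => c != 'a')).flatMap funcDouble = l.flatMap funcPiece := by
  induction l with
  | nil => simp
  | cons c t ih =>
    by_cases ha : c = 'a'
    · simp [ha, funcPiece, ih]
    · simp [ha, funcPiece, funcDouble, ih]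

-- ===== VERDICT (by name: the statement is the Claim_ definition above) =====
theorem func_spec : Claim_equal_func := by
  intro s _
  unfold Spec_func func func_alt
  obtain ⟨cl, hfold, hlen, htake, hdrop⟩ := func_pass1 s.toList s.toList.length le_rfl
  simp only [hfold, List.take_length] at *
  set l := s.toList with hl
  set F := l.filter (fun c => c != 'a') with hF
  set numb := (l.filter (fun c => c == 'b')).length with hnumb
  simp only [htake]
  have hlenflat : (F.flatMap funcDouble).length = F.length + numb := by
    rw [func_len_flatMap, hF, func_filter_b, hnumb]
  have hrep : (((F.length : Int) + (numb : Int) - 1) + 1).toNat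
      = (F.flatMap funcDouble).length := by
    rw [hlenflat]; omega
  have hj : ((F.length : Int) + (numb : Int) - 1)
      = ((F.flatMap funcDouble).length : Int) - 1 := by
    rw [hlenflat]; push_cast; ring
  rw [hrep, hj,
    ← List.append_nil (List.replicate (F.flatMap funcDouble).length (none : Option Char)),
    func_fill F F [] (by simp)]
  rw [show ((F.flatMap funcDouble).map some ++ ([] : List (Option Char)))
        = (F.flatMap funcDouble).map some by simp]
  rw [List.filterMap_map]
  simp only [Function.id_comp, List.filterMap_some]
  rw [hF, func_flat]
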